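-- pv_equiv track=rewrite | github.com/Tobi3010/SemanticWordGroups-BsProj | src/preprocessing.py | stopwords_to_count
-- ===== SOURCE A (Python) =====
-- def stopwords_to_count(text, stop_words):
--     n = len(text)
--     j = 0
--     while j < n:
--         if text[j] not in stop_words:
--             j += 1
--             continue
--         k = 0
--         while j+k < n and text[j+k] in stop_words:
--             k += 1
--         text = text[:j] + [str(k)] + text[j+k:]
--         n = n - k + 1
--     return text
-- ===== SOURCE B (Python) =====
-- def stopwords_to_count(text, stop_words):
--     stops = set(stop_words)
--     out = []
--     run = 0
--     for tok in text:
--         if tok in stops: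
--             run += 1
--         else:
--             if run:
--                 out.append(str(run))
--                 run = 0
--             out.append(tok)
--     if run:
--         out.append(str(run))
--     return out
-- ===== Notes on version B (the rewrite author's own statement) =====
-- stated objective: faster
-- what changed: Single left-to-right pass with a run counter and a set of stop words, instead of repeatedly rescanning and rebuilding the list by slicing at each stopword run.
-- outside the precondition, e.g. on stopwords_to_count(['a', 'a'], {'2', 'a'}): A returns ['1'], B returns ['2']
import Mathlib
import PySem

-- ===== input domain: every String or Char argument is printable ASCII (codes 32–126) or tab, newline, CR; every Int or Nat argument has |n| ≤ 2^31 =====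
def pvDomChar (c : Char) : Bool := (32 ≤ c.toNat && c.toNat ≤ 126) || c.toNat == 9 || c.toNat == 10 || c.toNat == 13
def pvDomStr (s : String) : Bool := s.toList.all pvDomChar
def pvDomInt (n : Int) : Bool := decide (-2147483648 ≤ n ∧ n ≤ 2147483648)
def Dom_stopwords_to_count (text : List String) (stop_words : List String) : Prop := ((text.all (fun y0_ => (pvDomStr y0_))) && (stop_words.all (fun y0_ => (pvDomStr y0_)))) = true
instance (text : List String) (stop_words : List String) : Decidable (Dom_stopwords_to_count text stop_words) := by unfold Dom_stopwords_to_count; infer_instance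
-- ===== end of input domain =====

-- B replaces A's repeated rescan-and-rebuild-by-slicing with one left-to-right pass keeping a
-- run counter (objective: faster, asymptotic). Equivalence is on the return value.

-- ===== PORT A =====
-- inner while loop: k = 0; while j+k < n and text[j+k] in stop_words: k += 1
def pvCountA (text stop_words : List String) (j : Nat) (k : Nat) : Nat :=
  if h : j + k < text.length ∧ PySem.List.pyGetD text ((j + k : Nat) : Int) "" ∈ stop_words then
    pvCountA text stop_words j (k + 1)
  else k
termination_by text.length - (j + k)
decreasing_by omega

-- body of the run-replacement step: text = text[:j] + [str(k)] + text[j+k:] with k the run length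
def pvRebuild (text stop_words : List String) (j : Nat) : List String :=
  PySem.List.slice text none (some ((j : Nat) : Int)) ++
    [PySem.Int.toStr ((pvCountA text stop_words j 0 : Nat) : Int)] ++
    PySem.List.slice text (some (((j + pvCountA text stop_words j 0 : Nat) : Nat) : Int)) none

-- outer while loop; the Python loop can fail to terminate (when the inserted count string is
-- itself a stop word, excluded by Pre_ below), so it carries fuel; under Pre_ the fuel
-- 2*len+2 used below is proved sufficient (lemma pvLoopA_eq).
def pvLoopA (stop_words : List String) : Nat → List String → Nat → List String
  | 0, text, _ => text
  | fuel + 1, text, j =>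
    if j < text.length then
      if PySem.List.pyGetD text ((j : Nat) : Int) "" ∈ stop_words then
        pvLoopA stop_words fuel (pvRebuild text stop_words j) j
      else
        pvLoopA stop_words fuel text (j + 1)
    else text

def stopwords_to_count (text : List String) (stop_words : List String) : List String :=
  pvLoopA stop_words (2 * text.length + 2) text 0

-- ===== PORT B =====
def stopwords_to_count_alt (text : List String) (stop_words : List String) : List String :=
  let stops := PySem.Set.ofList stop_words
  let st := text.foldl (fun (acc : List String × Nat) tok =>
      if tok ∈ stops then (acc.1, acc.2 + 1)
      else if acc.2 ≠ 0 then (acc.1 ++ [PySem.Int.toStr ((acc.2 : Nat) : Int), tok], 0)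
      else (acc.1 ++ [tok], 0)) ([], 0)
  if st.2 ≠ 0 then st.1 ++ [PySem.Int.toStr ((st.2 : Nat) : Int)] else st.1

-- ===== PRECONDITION & SPEC =====
-- Pre_ excludes stop-word lists that contain the decimal numeral of a possible run length
-- (1 .. len(text)): on those inputs A re-scans its own inserted count token as a stop word
-- (and can even loop forever), an artefact of A's in-place rewriting that B does not reproduce.
def Pre_stopwords_to_count (text : List String) (stop_words : List String) : Prop :=
  ∀ k ∈ List.range text.length, PySem.Int.toStr ((k : Int) + 1) ∉ stop_words
instance (text : List String) (stop_words : List String) : Decidable (Pre_stopwords_to_count text stop_words) := by unfold Pre_stopwords_to_count; infer_instance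

def pvWitness_stopwords_to_count : List String × List String := (["the", "cat", "the", "the", "sat"], ["the", "a"])

def Spec_stopwords_to_count (text : List String) (stop_words : List String) (out : List String) : Prop := out = stopwords_to_count_alt text stop_words
instance (text : List String) (stop_words : List String) (out : List String) : Decidable (Spec_stopwords_to_count text stop_words out) := by unfold Spec_stopwords_to_count; infer_instance

-- ===== CLAIM (what is proved, stated in full; the proofs are below) =====
def Claim_equal_stopwords_to_count : Prop := ∀ (text : List String) (stop_words : List String), Dom_stopwords_to_count text stop_words → Pre_stopwords_to_count text stop_words → Spec_stopwords_to_count text stop_words (stopwords_to_count text stop_words)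

-- ===== LEMMAS AND PROOFS =====

-- length of the maximal stopword run at the head of a list
def pvRun (stop_words : List String) : List String → Nat
  | [] => 0
  | t :: ts => if t ∈ stop_words then pvRun stop_words ts + 1 else 0

-- canonical result of processing l with a pending run of `run` stop words
def pvCanon (stop_words : List String) (run : Nat) : List String → List String
  | [] => if run ≠ 0 then [PySem.Int.toStr (run : Int)] else []
  | t :: ts =>
    if t ∈ stop_words then pvCanon stop_words (run + 1) ts
    else (if run ≠ 0 then [PySem.Int.toStr (run : Int), t] else [t]) ++ pvCanon stop_words 0 ts

lemma pvRun_le_length (sw : List String) (l : List String) : pvRun sw l ≤ l.length := by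
  induction l with
  | nil => simp [pvRun]
  | cons t ts ih => simp only [pvRun, List.length_cons]; split <;> omega

lemma pvCountA_eq (text sw : List String) (j k : Nat) :
    pvCountA text sw j k = k + pvRun sw (text.drop (j + k)) := by
  rw [pvCountA]
  split
  · rename_i h
    obtain ⟨hlt, hmem⟩ := h
    have hg : PySem.List.pyGetD text ((j + k : Nat) : Int) "" = text[j + k] := by
      rw [PySem.List.pyGetD_natCast]
      simp [List.getD, List.getElem?_eq_getElem hlt]
    rw [hg] at hmem
    rw [pvCountA_eq text sw j (k + 1)]
    rw [List.drop_eq_getElem_cons hlt]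
    simp only [pvRun, if_pos hmem]
    have : j + (k + 1) = j + k + 1 := by omega
    rw [this]; omega
  · rename_i h
    rcases Nat.lt_or_ge (j + k) text.length with hlt | hge
    · have hg : PySem.List.pyGetD text ((j + k : Nat) : Int) "" = text[j + k] := by
        rw [PySem.List.pyGetD_natCast]
        simp [List.getD, List.getElem?_eq_getElem hlt]
      have hmem : text[j + k] ∉ sw := fun hm => h ⟨hlt, hg ▸ hm⟩
      rw [List.drop_eq_getElem_cons hlt]
      simp [pvRun, if_neg hmem]
    · rw [List.drop_eq_nil_of_le hge]; simp [pvRun]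
termination_by text.length - (j + k)
decreasing_by omega

lemma pvCanon_pos (sw : List String) (l : List String) (r : Nat) (hr : 1 ≤ r) :
    pvCanon sw r l =
      PySem.Int.toStr ((r + pvRun sw l : Nat) : Int) :: pvCanon sw 0 (l.drop (pvRun sw l)) := by
  induction l generalizing r with
  | nil => simp [pvCanon, pvRun, Nat.one_le_iff_ne_zero.mp hr]
  | cons t ts ih =>
    by_cases ht : t ∈ sw
    · simp only [pvCanon, pvRun, if_pos ht]
      rw [ih (r + 1) (by omega)]
      have h1 : r + 1 + pvRun sw ts = r + (pvRun sw ts + 1) := by omega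
      rw [h1]
      simp
    · simp only [pvCanon, pvRun, if_neg ht, if_pos (Nat.one_le_iff_ne_zero.mp hr)]
      simp [pvCanon, ht]

lemma pvRebuild_eq (sw : List String) (pref : List String) (t : String) (ts : List String) :
    pvRebuild (pref ++ t :: ts) sw pref.length =
      (pref ++ [PySem.Int.toStr ((pvRun sw (t :: ts) : Nat) : Int)]) ++ (t :: ts).drop (pvRun sw (t :: ts)) := by
  have hk : pvCountA (pref ++ t :: ts) sw pref.length 0 = pvRun sw (t :: ts) := by
    rw [pvCountA_eq]
    have h0 : (pref ++ t :: ts).drop (pref.length + 0) = t :: ts :=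
      List.drop_length_add_append (l₁ := pref) (l₂ := t :: ts) 0
    rw [h0]; omega
  unfold pvRebuild
  rw [hk, PySem.List.slice_to_natCast, PySem.List.slice_from_natCast,
    List.take_left, List.drop_length_add_append]

lemma pvLoopA_eq (sw : List String) (fuel : Nat) (pref rest : List String)
    (hfuel : 2 * rest.length + 1 ≤ fuel)
    (hsw : ∀ k : Nat, 1 ≤ k → k ≤ rest.length → PySem.Int.toStr ((k : Nat) : Int) ∉ sw) :
    pvLoopA sw fuel (pref ++ rest) pref.length = pref ++ pvCanon sw 0 rest := by
  induction fuel using Nat.strong_induction_on generalizing pref rest with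
  | _ fuel ih =>
    match fuel, hfuel with
    | fuel + 1, hfuel =>
      cases rest with
      | nil =>
        simp [pvLoopA, pvCanon]
      | cons t ts =>
        have hj : pref.length < (pref ++ t :: ts).length := by simp
        have hget : PySem.List.pyGetD (pref ++ t :: ts) ((pref.length : Nat) : Int) "" = t := by
          simp [PySem.List.pyGetD_natCast, List.getD]
        rw [pvLoopA, if_pos hj, hget]
        by_cases ht : t ∈ sw
        · rw [if_pos ht, pvRebuild_eq sw pref t ts]
          have hk1 : 1 ≤ pvRun sw (t :: ts) := by simp [pvRun, ht]
          have hkle : pvRun sw (t :: ts) ≤ (t :: ts).length := pvRun_le_length sw _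
          set k := pvRun sw (t :: ts) with hkdef
          have hcount : PySem.Int.toStr ((k : Nat) : Int) ∉ sw := by
            apply hsw k hk1
            simpa using hkle
          match fuel, (by omega : 1 ≤ fuel) with
          | fuel' + 1, _ =>
            have hj' : pref.length < ((pref ++ [PySem.Int.toStr ((k : Nat) : Int)]) ++ (t :: ts).drop k).length := by
              simp
            have hget' : PySem.List.pyGetD ((pref ++ [PySem.Int.toStr ((k : Nat) : Int)]) ++ (t :: ts).drop k)
                ((pref.length : Nat) : Int) "" = PySem.Int.toStr ((k : Nat) : Int) := by
              simp [PySem.List.pyGetD_natCast, List.getD, List.append_assoc]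
            rw [pvLoopA, if_pos hj', hget', if_neg hcount]
            have hlen' : pref.length + 1 = (pref ++ [PySem.Int.toStr ((k : Nat) : Int)]).length := by simp
            rw [hlen']
            rw [ih fuel' (by omega) (pref ++ [PySem.Int.toStr ((k : Nat) : Int)]) ((t :: ts).drop k)
              (by simp only [List.length_drop]; omega)
              (fun k' h1 h2 => hsw k' h1 (by simp only [List.length_drop] at h2; omega))]
            have hstep : pvCanon sw 0 (t :: ts) =
                PySem.Int.toStr ((k : Nat) : Int) :: pvCanon sw 0 ((t :: ts).drop k) := by
              simp only [pvCanon, if_pos ht]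
              rw [pvCanon_pos sw ts 1 (by omega)]
              have h2 : (1 + pvRun sw ts : Nat) = k := by simp [hkdef, pvRun, ht]; omega
              rw [h2]
              have hdrop : (t :: ts).drop k = ts.drop (pvRun sw ts) := by
                have h3 : k = pvRun sw ts + 1 := by simp [hkdef, pvRun, ht]
                simp [h3]
              rw [hdrop]
            rw [hstep]
            simp
        · rw [if_neg ht]
          have hlen' : pref.length + 1 = (pref ++ [t]).length := by simp
          have happ : pref ++ t :: ts = (pref ++ [t]) ++ ts := by simp
          rw [hlen', happ]
          rw [ih fuel (by omega) (pref ++ [t]) ts (by simp at hfuel ⊢; omega)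
            (fun k' h1 h2 => hsw k' h1 (by simp; omega))]
          simp [pvCanon, ht]

lemma pvAlt_eq (sw : List String) (l : List String) (out : List String) (run : Nat) :
    (let st := l.foldl (fun (acc : List String × Nat) tok =>
        if tok ∈ PySem.Set.ofList sw then (acc.1, acc.2 + 1)
        else if acc.2 ≠ 0 then (acc.1 ++ [PySem.Int.toStr ((acc.2 : Nat) : Int), tok], 0)
        else (acc.1 ++ [tok], 0)) (out, run)
     if st.2 ≠ 0 then st.1 ++ [PySem.Int.toStr ((st.2 : Nat) : Int)] else st.1)
    = out ++ pvCanon sw run l := by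
  induction l generalizing out run with
  | nil => simp only [List.foldl_nil, pvCanon]; split <;> simp_all
  | cons t ts ih =>
    simp only [List.foldl_cons]
    by_cases ht : t ∈ sw
    · rw [if_pos ((PySem.Set.mem_ofList sw t).mpr ht)]
      rw [ih]
      simp [pvCanon, ht]
    · rw [if_neg (fun hm => ht ((PySem.Set.mem_ofList sw t).mp hm))]
      by_cases hr : run ≠ 0
      · rw [if_pos hr, ih]
        simp [pvCanon, ht, hr]
      · rw [if_neg hr, ih]
        simp only [ne_eq, not_not] at hr
        simp [pvCanon, ht, hr]

-- ===== VERDICT (by name: the statement is the Claim_ definition above) =====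
theorem stopwords_to_count_spec : Claim_equal_stopwords_to_count := by
  intro text sw _ hpre
  unfold Spec_stopwords_to_count stopwords_to_count stopwords_to_count_alt
  have hA := pvLoopA_eq sw (2 * text.length + 2) [] text (by omega)
    (fun k h1 h2 => by
      have := hpre (k - 1) (by simp [List.mem_range]; omega)
      have hcast : ((k - 1 : Nat) : Int) + 1 = ((k : Nat) : Int) := by omega
      rwa [hcast] at this)
  simp only [List.nil_append, List.length_nil] at hA
  rw [hA]
  have hB := pvAlt_eq sw text [] 0
  simp only [List.nil_append] at hB
  exact hB.symm
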